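-- pv_equiv track=rewrite | github.com/Joshi-574/paperIQ | ai_analyzer.py | _fill_default_questions
-- ===== SOURCE A (Python) =====
-- def _fill_default_questions(questions, num_questions):
--     """Fill with default questions if needed"""
--     default_questions = [
--         "What is the main argument presented?",
--         "How does the author support their claims?",
--         "What methodology was used in this research?",
--         "What are the key findings?",
--         "What limitations are mentioned?",
--         "What future work is suggested?",
--         "How does this relate to existing research?",
--         "What are the practical implications?"
--     ]
--
--     while len(questions) < num_questions:
--         questions.extend(default_questions)
--
--     return questions[:num_questions]
-- ===== SOURCE B (Python) =====
-- def _fill_default_questions(questions, num_questions):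
--     """Fill with default questions if needed (closed-form padding instead of a loop);
--     mutates `questions` exactly as the original (extends in whole 8-blocks)."""
--     default_questions = [
--         "What is the main argument presented?",
--         "How does the author support their claims?",
--         "What methodology was used in this research?",
--         "What are the key findings?",
--         "What limitations are mentioned?",
--         "What future work is suggested?",
--         "How does this relate to existing research?",
--         "What are the practical implications?"
--     ]
--     reps = max(0, -((len(questions) - num_questions) // 8))
--     questions.extend(default_questions * reps)
--     return questions[:num_questions]
-- ===== Notes on version B (the rewrite author's own statement) =====
-- stated objective: simpler
-- what changed: Replaces the while-loop that repeatedly extends the list with a closed-form ceiling count of needed 8-question blocks and a single extend, preserving the same block-wise overshoot mutation and slice.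
import Mathlib
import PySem

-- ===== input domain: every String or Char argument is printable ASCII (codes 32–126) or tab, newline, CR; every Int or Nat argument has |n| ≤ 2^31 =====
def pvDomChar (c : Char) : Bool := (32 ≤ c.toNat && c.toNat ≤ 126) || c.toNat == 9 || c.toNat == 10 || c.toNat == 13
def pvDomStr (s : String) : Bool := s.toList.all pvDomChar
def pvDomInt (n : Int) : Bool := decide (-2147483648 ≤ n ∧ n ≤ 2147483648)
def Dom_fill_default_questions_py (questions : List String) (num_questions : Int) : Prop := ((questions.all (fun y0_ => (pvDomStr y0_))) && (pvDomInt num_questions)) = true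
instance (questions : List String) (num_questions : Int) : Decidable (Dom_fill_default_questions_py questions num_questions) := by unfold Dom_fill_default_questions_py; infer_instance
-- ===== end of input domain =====

-- B changes: the repeated-extend while-loop becomes a closed-form ceiling count of
-- 8-question blocks plus one extend (objective: simpler). A mutates its argument in
-- place; equivalence here is about the return value.

-- ===== PORT A =====
def pvDefaultQuestions : List String := [
  "What is the main argument presented?",
  "How does the author support their claims?",
  "What methodology was used in this research?",
  "What are the key findings?",
  "What limitations are mentioned?",
  "What future work is suggested?",
  "How does this relate to existing research?",
  "What are the practical implications?"]

-- the while-loop of A: extend by the default block while len(questions) < num_questions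
def pvFillLoopA (questions : List String) (num : Int) : List String :=
  if (questions.length : Int) < num then
    pvFillLoopA (questions ++ pvDefaultQuestions) num
  else questions
termination_by (num - questions.length).toNat
decreasing_by simp [pvDefaultQuestions]; omega

def fill_default_questions_py (questions : List String) (num_questions : Int) : List String :=
  PySem.List.slice (pvFillLoopA questions num_questions) none (some num_questions)

-- ===== PORT B =====
def fill_default_questions_py_alt (questions : List String) (num_questions : Int) : List String :=
  let reps : Int := max 0 (-(PySem.Int.floordiv ((questions.length : Int) - num_questions) 8))
  PySem.List.slice (questions ++ (List.replicate reps.toNat pvDefaultQuestions).flatten)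
    none (some num_questions)

-- ===== PRECONDITION & SPEC =====
def Spec_fill_default_questions_py (questions : List String) (num_questions : Int) (out : List String) : Prop := out = fill_default_questions_py_alt questions num_questions
instance (questions : List String) (num_questions : Int) (out : List String) : Decidable (Spec_fill_default_questions_py questions num_questions out) := by unfold Spec_fill_default_questions_py; infer_instance

-- ===== CLAIM (what is proved, stated in full; the proofs are below) =====
def Claim_equal_fill_default_questions_py : Prop := ∀ (questions : List String) (num_questions : Int), Dom_fill_default_questions_py questions num_questions → Spec_fill_default_questions_py questions num_questions (fill_default_questions_py questions num_questions)

-- ===== LEMMAS AND PROOFS =====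
-- A's loop appends exactly B's closed-form number of default blocks
theorem pvFillLoopA_eq (q : List String) (n : Int) :
    pvFillLoopA q n =
      q ++ (List.replicate
        (max 0 (-(PySem.Int.floordiv ((q.length : Int) - n) 8))).toNat
        pvDefaultQuestions).flatten := by
  rw [pvFillLoopA]
  have hfd : PySem.Int.floordiv ((q.length : Int) - n) 8 = ((q.length : Int) - n) / 8 :=
    PySem.Int.floordiv_eq_ediv_of_pos (by omega)
  split
  · rename_i hlt
    rw [pvFillLoopA_eq (q ++ pvDefaultQuestions) n]
    have hfd' : PySem.Int.floordiv (((q ++ pvDefaultQuestions).length : Int) - n) 8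
        = (((q ++ pvDefaultQuestions).length : Int) - n) / 8 :=
      PySem.Int.floordiv_eq_ediv_of_pos (by omega)
    have hlen : ((q ++ pvDefaultQuestions).length : Int) = (q.length : Int) + 8 := by
      simp [pvDefaultQuestions]
    have key : (max 0 (-(PySem.Int.floordiv ((q.length : Int) - n) 8))).toNat
        = (max 0 (-(PySem.Int.floordiv (((q ++ pvDefaultQuestions).length : Int) - n) 8))).toNat + 1 := by
      rw [hfd, hfd', hlen]; omega
    rw [key, List.replicate_succ, List.flatten_cons, List.append_assoc]
  · rename_i hge
    have : (max 0 (-(PySem.Int.floordiv ((q.length : Int) - n) 8))).toNat = 0 := by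
      rw [hfd]; omega
    rw [this]; simp
termination_by (n - q.length).toNat
decreasing_by simp [pvDefaultQuestions]; omega

-- ===== VERDICT (by name: the statement is the Claim_ definition above) =====
theorem fill_default_questions_py_spec : Claim_equal_fill_default_questions_py := by
  intro q n _
  unfold Spec_fill_default_questions_py fill_default_questions_py fill_default_questions_py_alt
  rw [pvFillLoopA_eq]
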